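-- pv_equiv track=rewrite | github.com/AaronPilk/pilk-ai | core/tools/builtin/document_studio.py | _inline_styles
-- ===== SOURCE A (Python) =====
-- _EMAIL_H1_STYLE = (
--     "font-size:24px;line-height:1.25;font-weight:600;"
--     "margin:0 0 16px 0;color:#111;"
-- )
--
-- _EMAIL_H2_STYLE = (
--     "font-size:19px;line-height:1.3;font-weight:600;"
--     "margin:24px 0 12px 0;color:#111;"
--     "padding-bottom:6px;border-bottom:1px solid #eaeaea;"
-- )
--
-- _EMAIL_H3_STYLE = (
--     "font-size:16px;line-height:1.3;font-weight:600;"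
--     "margin:20px 0 8px 0;color:#222;"
-- )
--
-- _EMAIL_P_STYLE = "margin:0 0 14px 0;"
--
-- _EMAIL_UL_STYLE = "margin:0 0 14px 0;padding-left:22px;"
--
-- _EMAIL_LI_STYLE = "margin:0 0 6px 0;"
--
-- _EMAIL_CODE_STYLE = (
--     "font-family:'SF Mono',Menlo,Monaco,Consolas,monospace;"
--     "font-size:13px;background:#f5f5f5;padding:2px 5px;"
--     "border-radius:3px;color:#c7254e;"
-- )
--
-- _EMAIL_PRE_STYLE = (
--     "font-family:'SF Mono',Menlo,Monaco,Consolas,monospace;"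
--     "font-size:13px;background:#f5f5f5;padding:14px;"
--     "border-radius:6px;overflow-x:auto;line-height:1.45;"
--     "margin:0 0 14px 0;color:#1a1a1a;border:1px solid #e5e5e5;"
-- )
--
-- _EMAIL_BLOCKQUOTE_STYLE = (
--     "margin:0 0 14px 0;padding:8px 14px;border-left:3px solid #d0d0d0;"
--     "color:#555;background:#fafafa;"
-- )
--
-- _EMAIL_TABLE_STYLE = (
--     "border-collapse:collapse;margin:0 0 14px 0;width:100%;"
-- )
--
-- _EMAIL_TH_STYLE = (
--     "border:1px solid #e0e0e0;padding:8px 12px;background:#f5f5f5;"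
--     "text-align:left;font-weight:600;"
-- )
--
-- _EMAIL_TD_STYLE = "border:1px solid #e0e0e0;padding:8px 12px;"
--
-- _EMAIL_HR_STYLE = "border:0;border-top:1px solid #e5e5e5;margin:24px 0;"
--
-- _EMAIL_A_STYLE = "color:#7c3aed;text-decoration:underline;"
--
-- def _inline_styles(html: str) -> str:
--     """Add inline ``style="..."`` attributes to every common tag.
--
--     Lightweight, no external deps. Replaces opening tags only — closing
--     tags don't carry styles. This produces email-client-safe output for
--     Gmail, Outlook, and Apple Mail simultaneously.
--     """
--     repls = [
--         ("<h1>", f'<h1 style="{_EMAIL_H1_STYLE}">'),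
--         ("<h2>", f'<h2 style="{_EMAIL_H2_STYLE}">'),
--         ("<h3>", f'<h3 style="{_EMAIL_H3_STYLE}">'),
--         ("<h4>", f'<h4 style="{_EMAIL_H3_STYLE}">'),
--         ("<h5>", f'<h5 style="{_EMAIL_H3_STYLE}">'),
--         ("<h6>", f'<h6 style="{_EMAIL_H3_STYLE}">'),
--         ("<p>", f'<p style="{_EMAIL_P_STYLE}">'),
--         ("<ul>", f'<ul style="{_EMAIL_UL_STYLE}">'),
--         ("<ol>", f'<ol style="{_EMAIL_UL_STYLE}">'),
--         ("<li>", f'<li style="{_EMAIL_LI_STYLE}">'),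
--         ("<code>", f'<code style="{_EMAIL_CODE_STYLE}">'),
--         ("<pre>", f'<pre style="{_EMAIL_PRE_STYLE}">'),
--         ("<blockquote>", f'<blockquote style="{_EMAIL_BLOCKQUOTE_STYLE}">'),
--         ("<table>", f'<table style="{_EMAIL_TABLE_STYLE}">'),
--         ("<th>", f'<th style="{_EMAIL_TH_STYLE}">'),
--         ("<td>", f'<td style="{_EMAIL_TD_STYLE}">'),
--         ("<hr>", f'<hr style="{_EMAIL_HR_STYLE}">'),
--         ("<hr/>", f'<hr style="{_EMAIL_HR_STYLE}"/>'),
--         ("<hr />", f'<hr style="{_EMAIL_HR_STYLE}"/>'),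
--         ("<a href=", f'<a style="{_EMAIL_A_STYLE}" href='),
--     ]
--     for old, new in repls:
--         html = html.replace(old, new)
--     return html
-- ===== SOURCE B (Python) =====
-- """Single left-to-right scan with a replacement table assembled from
-- (tag, style) components, instead of 20 sequential full-string str.replace
-- passes (keys are prefix-free at any position and never occur inside a
-- replacement, so one pass yields the identical result)."""
--
-- _H_STYLE = {
--     "h1": "font-size:24px;line-height:1.25;font-weight:600;margin:0 0 16px 0;color:#111;",
--     "h2": ("font-size:19px;line-height:1.3;font-weight:600;margin:24px 0 12px 0;color:#111;"
--            "padding-bottom:6px;border-bottom:1px solid #eaeaea;"),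
--     "h3": "font-size:16px;line-height:1.3;font-weight:600;margin:20px 0 8px 0;color:#222;",
-- }
-- _H_STYLE["h4"] = _H_STYLE["h5"] = _H_STYLE["h6"] = _H_STYLE["h3"]
--
-- _LIST_STYLE = "margin:0 0 14px 0;padding-left:22px;"
-- _MONO = "font-family:'SF Mono',Menlo,Monaco,Consolas,monospace;font-size:13px;background:#f5f5f5;"
--
-- _TAG_STYLES = [
--     ("h1", _H_STYLE["h1"]), ("h2", _H_STYLE["h2"]), ("h3", _H_STYLE["h3"]),
--     ("h4", _H_STYLE["h4"]), ("h5", _H_STYLE["h5"]), ("h6", _H_STYLE["h6"]),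
--     ("p", "margin:0 0 14px 0;"),
--     ("ul", _LIST_STYLE), ("ol", _LIST_STYLE),
--     ("li", "margin:0 0 6px 0;"),
--     ("code", _MONO + "padding:2px 5px;border-radius:3px;color:#c7254e;"),
--     ("pre", _MONO + "padding:14px;border-radius:6px;overflow-x:auto;line-height:1.45;"
--             "margin:0 0 14px 0;color:#1a1a1a;border:1px solid #e5e5e5;"),
--     ("blockquote", "margin:0 0 14px 0;padding:8px 14px;border-left:3px solid #d0d0d0;"
--                    "color:#555;background:#fafafa;"),
--     ("table", "border-collapse:collapse;margin:0 0 14px 0;width:100%;"),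
--     ("th", "border:1px solid #e0e0e0;padding:8px 12px;background:#f5f5f5;"
--            "text-align:left;font-weight:600;"),
--     ("td", "border:1px solid #e0e0e0;padding:8px 12px;"),
-- ]
--
-- _HR_STYLE = "border:0;border-top:1px solid #e5e5e5;margin:24px 0;"
-- _A_STYLE = "color:#7c3aed;text-decoration:underline;"
--
-- _TABLE = [("<" + t + ">", "<" + t + ' style="' + s + '">') for t, s in _TAG_STYLES] + [
--     ("<hr>", '<hr style="' + _HR_STYLE + '">'),
--     ("<hr/>", '<hr style="' + _HR_STYLE + '"/>'),
--     ("<hr />", '<hr style="' + _HR_STYLE + '"/>'),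
--     ("<a href=", '<a style="' + _A_STYLE + '" href='),
-- ]
--
--
-- def _inline_styles(html: str) -> str:
--     out = []
--     i = 0
--     n = len(html)
--     while i < n:
--         for key, rep in _TABLE:
--             if html.startswith(key, i):
--                 out.append(rep)
--                 i += len(key)
--                 break
--         else:
--             out.append(html[i])
--             i += 1
--     return "".join(out)
-- ===== Notes on version B (the rewrite author's own statement) =====
-- stated objective: alternative
-- what changed: Replaces A's 20 sequential full-string str.replace passes over hard-coded replacement literals with one left-to-right scan driven by a replacement table assembled from (tag, style) components, emitting pieces joined once.
import Mathlib
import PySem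

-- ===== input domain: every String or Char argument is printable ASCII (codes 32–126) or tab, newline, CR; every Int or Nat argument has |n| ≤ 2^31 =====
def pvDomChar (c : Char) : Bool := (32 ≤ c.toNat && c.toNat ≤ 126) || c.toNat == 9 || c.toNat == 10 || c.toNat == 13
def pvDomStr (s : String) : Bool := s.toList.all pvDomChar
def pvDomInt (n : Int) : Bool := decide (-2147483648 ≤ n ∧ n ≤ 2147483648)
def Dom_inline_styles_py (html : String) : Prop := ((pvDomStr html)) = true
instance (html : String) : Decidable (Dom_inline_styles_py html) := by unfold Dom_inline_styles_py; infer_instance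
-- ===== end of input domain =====

-- B replaces A's 20 sequential str.replace passes by ONE left-to-right scan with a
-- replacement table assembled from (tag, style) components (alternative decomposition;
-- same return value, proved).

-- ===== PORT A =====
-- A's `repls` list, with the module-level style constants folded into the f-string literals
def inline_styles_py_repls : List (String × String) := [
  ("<h1>", "<h1 style=\"font-size:24px;line-height:1.25;font-weight:600;margin:0 0 16px 0;color:#111;\">"),
  ("<h2>", "<h2 style=\"font-size:19px;line-height:1.3;font-weight:600;margin:24px 0 12px 0;color:#111;padding-bottom:6px;border-bottom:1px solid #eaeaea;\">"),
  ("<h3>", "<h3 style=\"font-size:16px;line-height:1.3;font-weight:600;margin:20px 0 8px 0;color:#222;\">"),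
  ("<h4>", "<h4 style=\"font-size:16px;line-height:1.3;font-weight:600;margin:20px 0 8px 0;color:#222;\">"),
  ("<h5>", "<h5 style=\"font-size:16px;line-height:1.3;font-weight:600;margin:20px 0 8px 0;color:#222;\">"),
  ("<h6>", "<h6 style=\"font-size:16px;line-height:1.3;font-weight:600;margin:20px 0 8px 0;color:#222;\">"),
  ("<p>", "<p style=\"margin:0 0 14px 0;\">"),
  ("<ul>", "<ul style=\"margin:0 0 14px 0;padding-left:22px;\">"),
  ("<ol>", "<ol style=\"margin:0 0 14px 0;padding-left:22px;\">"),
  ("<li>", "<li style=\"margin:0 0 6px 0;\">"),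
  ("<code>", "<code style=\"font-family:'SF Mono',Menlo,Monaco,Consolas,monospace;font-size:13px;background:#f5f5f5;padding:2px 5px;border-radius:3px;color:#c7254e;\">"),
  ("<pre>", "<pre style=\"font-family:'SF Mono',Menlo,Monaco,Consolas,monospace;font-size:13px;background:#f5f5f5;padding:14px;border-radius:6px;overflow-x:auto;line-height:1.45;margin:0 0 14px 0;color:#1a1a1a;border:1px solid #e5e5e5;\">"),
  ("<blockquote>", "<blockquote style=\"margin:0 0 14px 0;padding:8px 14px;border-left:3px solid #d0d0d0;color:#555;background:#fafafa;\">"),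
  ("<table>", "<table style=\"border-collapse:collapse;margin:0 0 14px 0;width:100%;\">"),
  ("<th>", "<th style=\"border:1px solid #e0e0e0;padding:8px 12px;background:#f5f5f5;text-align:left;font-weight:600;\">"),
  ("<td>", "<td style=\"border:1px solid #e0e0e0;padding:8px 12px;\">"),
  ("<hr>", "<hr style=\"border:0;border-top:1px solid #e5e5e5;margin:24px 0;\">"),
  ("<hr/>", "<hr style=\"border:0;border-top:1px solid #e5e5e5;margin:24px 0;\"/>"),
  ("<hr />", "<hr style=\"border:0;border-top:1px solid #e5e5e5;margin:24px 0;\"/>"),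
  ("<a href=", "<a style=\"color:#7c3aed;text-decoration:underline;\" href=")]

-- `for old, new in repls: html = html.replace(old, new)`
def inline_styles_py (html : String) : String :=
  inline_styles_py_repls.foldl (fun h p => PySem.Str.replace h p.1 p.2) html
-- ===== PORT B =====
-- B's style components (`_H_STYLE`, `_LIST_STYLE`, `_MONO`, per-tag styles, `_HR_STYLE`, `_A_STYLE`)
def altStyleH1 : String := "font-size:24px;line-height:1.25;font-weight:600;margin:0 0 16px 0;color:#111;"
def altStyleH2 : String := "font-size:19px;line-height:1.3;font-weight:600;margin:24px 0 12px 0;color:#111;padding-bottom:6px;border-bottom:1px solid #eaeaea;"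
def altStyleH3 : String := "font-size:16px;line-height:1.3;font-weight:600;margin:20px 0 8px 0;color:#222;"
def altStyleList : String := "margin:0 0 14px 0;padding-left:22px;"
def altStyleMono : String := "font-family:'SF Mono',Menlo,Monaco,Consolas,monospace;font-size:13px;background:#f5f5f5;"
def altStyleHr : String := "border:0;border-top:1px solid #e5e5e5;margin:24px 0;"
def altStyleA : String := "color:#7c3aed;text-decoration:underline;"

-- B's `_TAG_STYLES`: the simple `<tag>` tags with their style bodies
def altTagStyles : List (String × String) := [
  ("h1", altStyleH1), ("h2", altStyleH2), ("h3", altStyleH3),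
  ("h4", altStyleH3), ("h5", altStyleH3), ("h6", altStyleH3),
  ("p", "margin:0 0 14px 0;"),
  ("ul", altStyleList), ("ol", altStyleList),
  ("li", "margin:0 0 6px 0;"),
  ("code", altStyleMono ++ "padding:2px 5px;border-radius:3px;color:#c7254e;"),
  ("pre", altStyleMono ++ "padding:14px;border-radius:6px;overflow-x:auto;line-height:1.45;margin:0 0 14px 0;color:#1a1a1a;border:1px solid #e5e5e5;"),
  ("blockquote", "margin:0 0 14px 0;padding:8px 14px;border-left:3px solid #d0d0d0;color:#555;background:#fafafa;"),
  ("table", "border-collapse:collapse;margin:0 0 14px 0;width:100%;"),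
  ("th", "border:1px solid #e0e0e0;padding:8px 12px;background:#f5f5f5;text-align:left;font-weight:600;"),
  ("td", "border:1px solid #e0e0e0;padding:8px 12px;")]

-- B's `_TABLE`: keys/replacements ASSEMBLED from the components (the comprehension
-- over `_TAG_STYLES` plus the three `<hr>` forms and `<a href=`)
def inline_styles_py_alt_table : List (String × String) :=
  altTagStyles.map (fun p => ("<" ++ p.1 ++ ">", "<" ++ p.1 ++ " style=\"" ++ p.2 ++ "\">"))
  ++ [("<hr>", "<hr style=\"" ++ altStyleHr ++ "\">"),
      ("<hr/>", "<hr style=\"" ++ altStyleHr ++ "\"/>"),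
      ("<hr />", "<hr style=\"" ++ altStyleHr ++ "\"/>"),
      ("<a href=", "<a style=\"" ++ altStyleA ++ "\" href=")]

-- B's inner `for key, rep in _TABLE: if html.startswith(key, i): ... break` —
-- the first table entry whose key starts at the current position
def pvFind (ps : List (List Char × List Char)) (s : List Char) : Option (List Char × List Char) :=
  ps.find? (fun p => p.1.isPrefixOf s)

-- B's while-loop: emit the matched replacement and advance by len(key), else copy one
-- char.  `i += len(key)` is `drop k.length (c :: t)`, written `drop (k.length - 1) t`
-- for structural termination (every key in the table is nonempty).
def pvScan (ps : List (List Char × List Char)) : List Char → List Char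
  | [] => []
  | c :: t =>
    match pvFind ps (c :: t) with
    | some (k, r) => r ++ pvScan ps (t.drop (k.length - 1))
    | none => c :: pvScan ps t
termination_by l => l.length
decreasing_by
  · simp only [List.length_drop, List.length_cons]; omega
  · simp only [List.length_cons]; omega

-- `"".join(out)` of the emitted pieces = the concatenated scan output
def inline_styles_py_alt (html : String) : String :=
  String.ofList (pvScan (inline_styles_py_alt_table.map (fun p => (p.1.toList, p.2.toList))) html.toList)

-- ===== PRECONDITION & SPEC =====
def Spec_inline_styles_py (html : String) (out : String) : Prop := out = inline_styles_py_alt html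
instance (html : String) (out : String) : Decidable (Spec_inline_styles_py html out) := by unfold Spec_inline_styles_py; infer_instance

-- ===== CLAIM (what is proved, stated in full; the proofs are below) =====
def Claim_equal_inline_styles_py : Prop := ∀ (html : String), Dom_inline_styles_py html → Spec_inline_styles_py html (inline_styles_py html)

-- ===== LEMMAS AND PROOFS =====

-- the table at the List Char level (A's table mapped through toList)
def pvAllPairs : List (List Char × List Char) :=
  inline_styles_py_repls.map (fun p => (p.1.toList, p.2.toList))

set_option maxRecDepth 100000 in
theorem pv_tabs_eq : inline_styles_py_alt_table = inline_styles_py_repls := by decide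

theorem pv_tab_eqB : inline_styles_py_alt_table.map (fun p => (p.1.toList, p.2.toList)) = pvAllPairs := by
  rw [pv_tabs_eq]; rfl

-- shape of every key and replacement: starts with '<', no interior '<'
abbrev pvOK (l : List Char) : Prop := l.head? = some '<' ∧ '<' ∉ l.tail

set_option maxRecDepth 100000 in
theorem pv_good1 : ∀ p ∈ pvAllPairs, pvOK p.1 ∧ pvOK p.2 := by decide

set_option maxRecDepth 100000 in
theorem pv_good2 : ∀ p ∈ pvAllPairs, ∀ q ∈ pvAllPairs, ¬ p.1 <+: q.2 ∧ p.1.length ≤ q.2.length := by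
  decide

set_option maxRecDepth 100000 in
theorem pv_good3 : ∀ p ∈ pvAllPairs, p.1 ≠ [] := by decide

-- fuel-free form of PySem.Chars.replace's scanner (single key)
def pvRep1 (o n : List Char) : List Char → List Char
  | [] => []
  | c :: t => if o.isPrefixOf (c :: t) then n ++ pvRep1 o n (t.drop (o.length - 1)) else c :: pvRep1 o n t
termination_by l => l.length
decreasing_by
  · simp only [List.length_drop, List.length_cons]; omega
  · simp only [List.length_cons]; omega

theorem pv_go_zero (o n l acc : List Char) : PySem.Chars.replace.go o n 0 l acc = acc.reverse ++ l := by
  rw [PySem.Chars.replace.go.eq_def]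

theorem pv_go_nil (o n acc : List Char) (f : Nat) : PySem.Chars.replace.go o n (f+1) [] acc = acc.reverse := by
  rw [PySem.Chars.replace.go.eq_def]

theorem pv_go_cons (o n acc : List Char) (f : Nat) (c : Char) (t : List Char) :
    PySem.Chars.replace.go o n (f+1) (c :: t) acc =
      if o.isPrefixOf (c :: t) then PySem.Chars.replace.go o n f (List.drop o.length (c :: t)) (n.reverse ++ acc)
      else PySem.Chars.replace.go o n f t (c :: acc) := by
  rw [PySem.Chars.replace.go.eq_def]

theorem pv_go_can (o n : List Char) (ho : o ≠ []) :
    ∀ (fuel : Nat) (l acc : List Char), l.length ≤ fuel →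
      PySem.Chars.replace.go o n fuel l acc = acc.reverse ++ pvRep1 o n l := by
  intro fuel
  induction fuel with
  | zero =>
    intro l acc h
    have hl : l = [] := by cases l <;> simp_all
    subst hl
    simp [pv_go_zero, pvRep1]
  | succ f ih =>
    intro l acc h
    cases l with
    | nil => simp [pv_go_nil, pvRep1]
    | cons c t =>
      rw [pv_go_cons]
      by_cases hp : o.isPrefixOf (c :: t)
      · rw [if_pos hp]
        have hol : 1 ≤ o.length := by cases o <;> simp_all
        have hlf : (List.drop o.length (c :: t)).length ≤ f := by
          simp only [List.length_drop, List.length_cons] at *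
          omega
        rw [ih _ _ hlf]
        rw [pvRep1, if_pos hp]
        have hdd : List.drop o.length (c :: t) = List.drop (o.length - 1) t := by
          cases o with
          | nil => simp_all
          | cons a o' => simp
        rw [hdd]; simp
      · rw [if_neg hp]
        have hlf : t.length ≤ f := by simp at h; omega
        rw [ih _ _ hlf]
        rw [pvRep1, if_neg hp]
        simp

theorem pv_replace_eq (l o n : List Char) (ho : o ≠ []) :
    PySem.Chars.replace l o n = pvRep1 o n l := by
  rw [PySem.Chars.replace]
  have he : o.isEmpty = false := by simp [ho]
  rw [he]
  simpa using pv_go_can o n ho l.length l [] le_rfl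

theorem pvFind_eq_none_iff (ps : List (List Char × List Char)) (s : List Char) :
    pvFind ps s = none ↔ ∀ p ∈ ps, ¬ p.1 <+: s := by
  simp [pvFind, List.find?_eq_none, List.isPrefixOf_iff_prefix]

theorem pvFind_some (ps : List (List Char × List Char)) (s : List Char)
    (p : List Char × List Char) (h : pvFind ps s = some p) : p ∈ ps ∧ p.1 <+: s := by
  refine ⟨List.mem_of_find?_eq_some h, ?_⟩
  have := List.find?_some h
  simpa [List.isPrefixOf_iff_prefix] using this

theorem pvFind_append (ps qs : List (List Char × List Char)) (s : List Char) :
    pvFind (ps ++ qs) s = (pvFind ps s).or (pvFind qs s) := by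
  simp [pvFind, List.find?_append]

theorem pvScan_nil (ps : List (List Char × List Char)) : pvScan ps [] = [] := by
  simp [pvScan]

theorem pvScan_cons_some (ps : List (List Char × List Char)) (c : Char) (t k r : List Char)
    (h : pvFind ps (c :: t) = some (k, r)) :
    pvScan ps (c :: t) = r ++ pvScan ps (t.drop (k.length - 1)) := by
  rw [pvScan, h]

theorem pvScan_cons_none (ps : List (List Char × List Char)) (c : Char) (t : List Char)
    (h : pvFind ps (c :: t) = none) :
    pvScan ps (c :: t) = c :: pvScan ps t := by
  rw [pvScan, h]

theorem pvScan_match (ps : List (List Char × List Char)) (s k r : List Char)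
    (hk : k ≠ []) (h : pvFind ps s = some (k, r)) :
    pvScan ps s = r ++ pvScan ps (s.drop k.length) := by
  cases s with
  | nil =>
    exfalso
    have := (pvFind_some ps [] (k, r) h).2
    simp at this
    exact hk this
  | cons c t =>
    rw [pvScan_cons_some ps c t k r h]
    congr 1
    cases k with
    | nil => exact absurd rfl hk
    | cons a k' => simp

theorem pvScan_empty (s : List Char) : pvScan [] s = s := by
  induction s with
  | nil => exact pvScan_nil []
  | cons c t ih =>
    rw [pvScan_cons_none [] c t (by simp [pvFind])]
    rw [ih]

theorem pv_split (ps : List (List Char × List Char)) :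
    ∀ (j : Nat) (s : List Char), (∀ i < j, ∀ p ∈ ps, ¬ p.1 <+: s.drop i) →
      pvScan ps s = s.take j ++ pvScan ps (s.drop j) := by
  intro j
  induction j with
  | zero => intro s h; simp
  | succ j ih =>
    intro s h
    cases s with
    | nil => simp [pvScan_nil]
    | cons c t =>
      have h0 : pvFind ps (c :: t) = none := by
        rw [pvFind_eq_none_iff]
        intro p hp
        simpa using h 0 (by omega) p hp
      rw [pvScan_cons_none ps c t h0]
      rw [ih t (by intro i hi p hp; simpa using h (i+1) (by omega) p hp)]
      simp

theorem pv_walk (o n : List Char) :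
    ∀ (r X : List Char), (∀ i < r.length, ¬ o <+: (r.drop i ++ X)) →
      pvRep1 o n (r ++ X) = r ++ pvRep1 o n X := by
  intro r
  induction r with
  | nil => intro X h; simp
  | cons a r' ih =>
    intro X h
    have h0 : ¬ o.isPrefixOf (a :: (r' ++ X)) := by
      rw [List.isPrefixOf_iff_prefix]
      simpa using h 0 (by simp)
    rw [List.cons_append, pvRep1, if_neg h0]
    rw [ih X (by intro i hi; simpa using h (i+1) (by simpa using hi))]
    simp

theorem pv_agree (ps : List (List Char × List Char))
    (hps : ∀ p ∈ ps, pvOK p.1 ∧ pvOK p.2) :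
    ∀ (m : Nat) (s : List Char), s.length ≤ m →
      pvScan ps s = s ∨ ∃ d, (pvScan ps s).take d = s.take d ∧ s[d]? = some '<' ∧ (pvScan ps s)[d]? = some '<' := by
  intro m
  induction m with
  | zero =>
    intro s h
    have hs : s = [] := by cases s <;> simp_all
    subst hs; left; exact pvScan_nil ps
  | succ m ih =>
    intro s h
    cases s with
    | nil => left; exact pvScan_nil ps
    | cons c t =>
      cases hf : pvFind ps (c :: t) with
      | some p =>
        obtain ⟨k, r⟩ := p
        obtain ⟨hmem, hpre⟩ := pvFind_some ps (c :: t) (k, r) hf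
        obtain ⟨⟨hk1, _⟩, ⟨hr1, _⟩⟩ := hps (k, r) hmem
        right
        refine ⟨0, by simp, ?_, ?_⟩
        · cases k with
          | nil => simp at hk1
          | cons a k' =>
            obtain ⟨u, hu⟩ := hpre
            rw [List.cons_append] at hu
            injection hu with h1 h2
            simp at hk1
            simp [← h1, hk1]
        · rw [pvScan_cons_some ps c t k r hf]
          cases r with
          | nil => simp at hr1
          | cons b r' => simp at hr1; simp [hr1]
      | none =>
        rw [pvScan_cons_none ps c t hf]
        rcases ih t (by simp at h; omega) with heq | ⟨d, htake, ht, hsc⟩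
        · left; rw [heq]
        · right
          exact ⟨d+1, by simp [htake], by simpa using ht, by simpa using hsc⟩

theorem pv_prefix_getElem? (o l : List Char) (h : o <+: l) (i : Nat) (hi : i < o.length) :
    l[i]? = o[i]? := by
  obtain ⟨u, rfl⟩ := h
  rw [List.getElem?_append_left hi]

theorem pv_noprefix (ps : List (List Char × List Char))
    (hps : ∀ p ∈ ps, pvOK p.1 ∧ pvOK p.2) (o : List Char) (ho : pvOK o)
    (c : Char) (t : List Char) (hno : ¬ o <+: (c :: t)) :
    ¬ o <+: (c :: pvScan ps t) := by
  intro hpre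
  rcases pv_agree ps hps t.length t le_rfl with heq | ⟨d, htake, ht, hsc⟩
  · rw [heq] at hpre; exact hno hpre
  · by_cases hl : o.length ≤ d + 1
    · apply hno
      have h1 : o <+: (c :: pvScan ps t).take (d+1) := List.prefix_take_iff.mpr ⟨hpre, hl⟩
      rw [List.take_succ_cons, htake, ← List.take_succ_cons] at h1
      exact (List.prefix_take_iff.mp h1).1
    · have hlt : d + 1 < o.length := by omega
      have h2 : (c :: pvScan ps t)[d+1]? = o[d+1]? := pv_prefix_getElem? o _ hpre (d+1) hlt
      have h3 : o[d+1]? = some '<' := by rw [← h2]; simpa using hsc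
      obtain ⟨ho1, ho2⟩ := ho
      cases o with
      | nil => simp at ho1
      | cons a o' =>
        simp only [List.getElem?_cons_succ] at h3
        exact ho2 (by simpa using List.mem_of_getElem? h3)

theorem pv_step (o n : List Char) (ps : List (List Char × List Char)) (ho : pvOK o)
    (hps : ∀ p ∈ ps, pvOK p.1 ∧ pvOK p.2)
    (hx : ∀ p ∈ ps, ¬ o <+: p.2 ∧ o.length ≤ p.2.length) :
    ∀ (m : Nat) (s : List Char), s.length ≤ m →
      pvRep1 o n (pvScan ps s) = pvScan (ps ++ [(o, n)]) s := by
  intro m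
  induction m with
  | zero =>
    intro s h
    have hs : s = [] := by cases s <;> simp_all
    subst hs; simp [pvScan_nil, pvRep1]
  | succ m ih =>
    intro s h
    cases s with
    | nil => simp [pvScan_nil, pvRep1]
    | cons c t =>
      cases hf : pvFind ps (c :: t) with
      | some p =>
        obtain ⟨k, r⟩ := p
        obtain ⟨hmem, hpre⟩ := pvFind_some _ _ _ hf
        obtain ⟨⟨hk1, hk2⟩, ⟨hr1, hr2⟩⟩ := hps (k, r) hmem
        obtain ⟨hor, holen⟩ := hx (k, r) hmem
        have hknil : k ≠ [] := by cases k <;> simp_all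
        have hk1' : 1 ≤ k.length := by cases k <;> simp_all
        have hlen2 : (List.drop k.length (c :: t)).length ≤ m := by
          have hkle : k.length ≤ (c :: t).length := hpre.length_le
          simp only [List.length_drop, List.length_cons] at *
          omega
        have hwalk : ∀ i < r.length, ¬ o <+: (r.drop i ++ pvScan ps (List.drop k.length (c :: t))) := by
          intro i hi hcon
          rcases Nat.eq_zero_or_pos i with rfl | hipos
          · simp only [List.drop_zero] at hcon
            apply hor
            have heq : o = (r ++ pvScan ps (List.drop k.length (c :: t))).take o.length :=
              List.prefix_iff_eq_take.mp hcon
            rw [List.take_append_of_le_length holen] at heq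
            rw [heq]; exact List.take_prefix _ _
          · cases hdi : r.drop i with
            | nil => rw [List.drop_eq_nil_iff] at hdi; omega
            | cons b rr =>
              have hb? : r[i]? = some b := by
                have hgd : (r.drop i)[0]? = r[i]? := by simp [List.getElem?_drop]
                rw [hdi] at hgd; simpa using hgd.symm
              obtain ⟨ho1, _⟩ := ho
              cases o with
              | nil => simp at ho1
              | cons a o' =>
                simp only [List.head?_cons, Option.some.injEq] at ho1
                subst ho1
                rw [hdi, List.cons_append] at hcon
                obtain ⟨u, hu⟩ := hcon
                rw [List.cons_append] at hu
                injection hu with hb hrest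
                cases r with
                | nil => simp at hi
                | cons r0 rt =>
                  obtain ⟨j, rfl⟩ : ∃ j, i = j + 1 := ⟨i - 1, by omega⟩
                  simp only [List.getElem?_cons_succ] at hb?
                  apply hr2
                  have hmem' : b ∈ rt := List.mem_of_getElem? hb?
                  simpa [← hb] using hmem'
        rw [pvScan_match ps (c :: t) k r hknil hf]
        rw [pv_walk o n r _ hwalk]
        rw [ih (List.drop k.length (c :: t)) hlen2]
        have hf2 : pvFind (ps ++ [(o, n)]) (c :: t) = some (k, r) := by
          rw [pvFind_append, hf]; rfl
        rw [pvScan_match _ (c :: t) k r hknil hf2]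
      | none =>
        have hnone : ∀ q ∈ ps, ¬ q.1 <+: (c :: t) := (pvFind_eq_none_iff _ _).mp hf
        by_cases hos : o <+: (c :: t)
        · have honlen : o.length ≤ t.length + 1 := by simpa using hos.length_le
          have hsplit : ∀ i < o.length, ∀ q ∈ ps, ¬ q.1 <+: (c :: t).drop i := by
            intro i hi q hq hcon
            rcases Nat.eq_zero_or_pos i with rfl | hipos
            · exact hnone q hq (by simpa using hcon)
            · obtain ⟨hq1, _⟩ := (hps q hq).1
              cases hdi : (c :: t).drop i with
              | nil =>
                rw [List.drop_eq_nil_iff] at hdi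
                simp only [List.length_cons] at hdi
                omega
              | cons b rr =>
                have hb? : (c :: t)[i]? = some b := by
                  have hgd : ((c :: t).drop i)[0]? = (c :: t)[i]? := by simp [List.getElem?_drop]
                  rw [hdi] at hgd; simpa using hgd.symm
                have hbo : o[i]? = some b := by
                  rw [← pv_prefix_getElem? o (c :: t) hos i hi]; exact hb?
                rw [hdi] at hcon
                cases hq1eq : q.1 with
                | nil => rw [hq1eq] at hq1; simp at hq1
                | cons q0 qt =>
                  rw [hq1eq] at hq1
                  simp only [List.head?_cons, Option.some.injEq] at hq1
                  rw [hq1eq] at hcon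
                  obtain ⟨u, hu⟩ := hcon
                  rw [List.cons_append] at hu
                  injection hu with hb0 _
                  obtain ⟨ho1, ho2⟩ := ho
                  cases o with
                  | nil => simp at ho1
                  | cons a o' =>
                    obtain ⟨j, rfl⟩ : ∃ j, i = j + 1 := ⟨i - 1, by omega⟩
                    simp only [List.getElem?_cons_succ] at hbo
                    apply ho2
                    have hmem' : b ∈ o' := List.mem_of_getElem? hbo
                    have hblt : b = '<' := by rw [← hb0, hq1]
                    simpa [hblt] using hmem'
          have htake : (c :: t).take o.length = o := (List.prefix_iff_eq_take.mp hos).symm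
          rw [pv_split ps o.length (c :: t) hsplit, htake]
          obtain ⟨ho1, _⟩ := ho
          cases o with
          | nil => simp at ho1
          | cons a o' =>
            simp only [List.head?_cons, Option.some.injEq] at ho1
            subst ho1
            rw [List.cons_append, pvRep1,
              if_pos (by rw [List.isPrefixOf_iff_prefix, ← List.cons_append]; exact List.prefix_append _ _)]
            have hdl : (o' ++ pvScan ps (List.drop ('<' :: o').length (c :: t))).drop (('<' :: o').length - 1)
                = pvScan ps (List.drop ('<' :: o').length (c :: t)) := by
              simp only [List.length_cons, Nat.add_sub_cancel]
              exact List.drop_left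
            rw [hdl]
            rw [ih _ (by simp only [List.length_drop, List.length_cons] at *; omega)]
            have hpref : ('<' :: o').isPrefixOf (c :: t) = true := by
              rw [List.isPrefixOf_iff_prefix]; exact hos
            have hf2 : pvFind (ps ++ [('<' :: o', n)]) (c :: t) = some ('<' :: o', n) := by
              rw [pvFind_append, hf]
              simp [pvFind, hpref]
            rw [pvScan_match _ (c :: t) _ n (by simp) hf2]
        · rw [pvScan_cons_none ps c t hf]
          have hnp : ¬ o.isPrefixOf (c :: pvScan ps t) := by
            rw [List.isPrefixOf_iff_prefix]
            exact pv_noprefix ps hps o ho c t hos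
          rw [pvRep1, if_neg hnp]
          rw [ih t (by simp only [List.length_cons] at h; omega)]
          have hopref : o.isPrefixOf (c :: t) = false := by
            rw [← Bool.not_eq_true, List.isPrefixOf_iff_prefix]; exact hos
          have hf2 : pvFind (ps ++ [(o, n)]) (c :: t) = none := by
            rw [pvFind_append, hf]
            simp [pvFind, hopref]
          rw [pvScan_cons_none _ c t hf2]

theorem pv_main :
    ∀ (todo done : List (List Char × List Char)),
      (∀ p ∈ done ++ todo, pvOK p.1 ∧ pvOK p.2) →
      (∀ p ∈ todo, ∀ q ∈ done ++ todo, ¬ p.1 <+: q.2 ∧ p.1.length ≤ q.2.length) →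
      ∀ s : List Char,
        todo.foldl (fun h p => pvRep1 p.1 p.2 h) (pvScan done s) = pvScan (done ++ todo) s := by
  intro todo
  induction todo with
  | nil => intro done _ _ s; simp
  | cons p todo' ih =>
    intro done hall hcross s
    have hstep : pvRep1 p.1 p.2 (pvScan done s) = pvScan (done ++ [p]) s := by
      exact pv_step p.1 p.2 done
        ((hall p (by simp)).1)
        (fun q hq => hall q (by simp [hq]))
        (fun q hq => hcross p (by simp) q (by simp [hq]))
        s.length s le_rfl
    calc (p :: todo').foldl (fun h p => pvRep1 p.1 p.2 h) (pvScan done s)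
        = todo'.foldl (fun h p => pvRep1 p.1 p.2 h) (pvRep1 p.1 p.2 (pvScan done s)) := by
          simp [List.foldl_cons]
      _ = todo'.foldl (fun h p => pvRep1 p.1 p.2 h) (pvScan (done ++ [p]) s) := by rw [hstep]
      _ = pvScan ((done ++ [p]) ++ todo') s := by
          apply ih (done ++ [p])
          · intro q hq; apply hall; simpa [or_assoc] using hq
          · intro q hq w hw
            exact hcross q (by simp [hq]) w (by simpa [or_assoc] using hw)
      _ = pvScan (done ++ p :: todo') s := by rw [List.append_assoc]; rfl

theorem pv_foldl_toList (ps : List (String × String)) :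
    ∀ s : String,
      (ps.foldl (fun h p => PySem.Str.replace h p.1 p.2) s).toList
        = ps.foldl (fun l p => PySem.Chars.replace l p.1.toList p.2.toList) s.toList := by
  induction ps with
  | nil => intro s; rfl
  | cons p ps' ih =>
    intro s
    rw [List.foldl_cons, List.foldl_cons, ih]
    congr 1
    exact PySem.Str.toList_replace s p.1 p.2

theorem pv_foldl_rep1 (ps : List (List Char × List Char)) (hne : ∀ p ∈ ps, p.1 ≠ []) :
    ∀ l : List Char,
      ps.foldl (fun l p => PySem.Chars.replace l p.1 p.2) l
        = ps.foldl (fun h p => pvRep1 p.1 p.2 h) l := by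
  induction ps with
  | nil => intro l; rfl
  | cons p ps' ih =>
    intro l
    rw [List.foldl_cons, List.foldl_cons]
    rw [pv_replace_eq l p.1 p.2 (hne p (by simp))]
    exact ih (fun q hq => hne q (by simp [hq])) _

theorem pv_a_toList (html : String) :
    (inline_styles_py html).toList = pvScan pvAllPairs html.toList := by
  unfold inline_styles_py
  rw [pv_foldl_toList]
  have hmap : inline_styles_py_repls.foldl (fun l p => PySem.Chars.replace l p.1.toList p.2.toList) html.toList
      = (inline_styles_py_repls.map (fun p => (p.1.toList, p.2.toList))).foldl
          (fun l p => PySem.Chars.replace l p.1 p.2) html.toList := by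
    rw [List.foldl_map]
  have hdef : pvAllPairs = inline_styles_py_repls.map (fun p => (p.1.toList, p.2.toList)) := rfl
  rw [hmap, ← hdef]
  rw [pv_foldl_rep1 pvAllPairs pv_good3]
  have hm := pv_main pvAllPairs [] (by simpa using pv_good1) (by simpa using pv_good2) html.toList
  simpa [pvScan_empty] using hm

-- ===== VERDICT (by name: the statement is the Claim_ definition above) =====
theorem inline_styles_py_spec : Claim_equal_inline_styles_py := by
  intro html _
  unfold Spec_inline_styles_py inline_styles_py_alt
  rw [pv_tab_eqB]
  have h3 := congrArg String.ofList (pv_a_toList html)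
  rwa [String.ofList_toList] at h3
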